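-- pv_equiv track=rewrite | github.com/ND0322/Competitive-Programming-Solutions | CCC/2011/S3.py | check
-- ===== SOURCE A (Python) =====
-- def check(m,x,y):
--
--
--
--   if x < 5**(m-1) or x > 3 * 5**(m-1):
--     return "empty"
--
--
--   if(x // 5**(m-1) == 2 and y < 2*5**(m-1)):
--
--     return "crystal"
--
--
--   if (x // 5**(m-1) != 2 and y >= 2*5**(m-1)):
--     return "empty"
--
--
--   if (x // 5**(m-1) == 1 or x // 5**(m-1) == 3) and y < 5**(m-1):
--     return "crystal"
--
--
--   if m == 1:
--     return "empty"
--
--   if y >= 2*5**(m-1):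
--     return check(m-1,x% (5**(m-1)),y%(2*5**(m-1)))
--
--   return check(m-1,x% (5**(m-1)),y%(5**(m-1)))
-- ===== SOURCE B (Python) =====
-- def check(m, x, y):
--     s = 5 ** (m - 1)
--     while True:
--         q = x // s
--         if q == 2:
--             if y < 2 * s:
--                 return "crystal"
--             y %= 2 * s
--         elif q == 1 or x == 3 * s:
--             if y >= 2 * s:
--                 return "empty"
--             if y < s:
--                 return "crystal"
--             y %= s
--         else:
--             return "empty"
--         if s == 1:
--             return "empty"
--         x %= s
--         s //= 5
-- ===== Notes on version B (the rewrite author's own statement) =====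
-- stated objective: alternative
-- what changed: Replaces A's five-guard tail recursion on level m by a single while-loop over the shrinking cell size s=5**(m-1), dispatching once on the column digit q=x//s (with the x==3*s corner folded into the q==1 branch) and updating x,y,s in place.
-- outside the precondition, e.g. on check(0, 0, 0): A returns 'empty', B returns 'empty'; on check(-5703, -47, -3): A returns 'empty', B raises ZeroDivisionError
import Mathlib
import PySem

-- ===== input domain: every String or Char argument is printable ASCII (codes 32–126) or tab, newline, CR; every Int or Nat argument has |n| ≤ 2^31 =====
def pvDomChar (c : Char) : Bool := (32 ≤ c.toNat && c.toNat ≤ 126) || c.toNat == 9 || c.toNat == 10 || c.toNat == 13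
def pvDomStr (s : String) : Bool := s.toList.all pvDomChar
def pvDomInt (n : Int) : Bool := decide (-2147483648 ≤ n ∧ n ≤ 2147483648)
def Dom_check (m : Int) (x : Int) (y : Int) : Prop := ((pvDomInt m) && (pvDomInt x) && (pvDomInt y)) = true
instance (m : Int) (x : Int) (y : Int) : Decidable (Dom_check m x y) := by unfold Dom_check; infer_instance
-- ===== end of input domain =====

-- B replaces A's five-guard tail recursion on the level m by a single loop over the shrinking
-- cell size s = 5^(m-1), dispatching once on the column digit x // s; same values on Pre_ (m ≥ 1).


-- ===== PORT A =====
-- Literal port of A's recursion. Python's 'if m == 1' is ported as 'm ≤ 1' so the recursion is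
-- well-founded on every Int; for m ≤ 0 (outside Pre_check) Python evaluates 5**(m-1) as a FLOAT,
-- so no Int port is exact there; the port is exact for m ≥ 1.
def check (m : Int) (x : Int) (y : Int) : String :=
  let s : Int := 5 ^ (m - 1).toNat
  if x < s ∨ x > 3 * s then "empty"
  else if PySem.Int.floordiv x s = 2 ∧ y < 2 * s then "crystal"
  else if PySem.Int.floordiv x s ≠ 2 ∧ y ≥ 2 * s then "empty"
  else if (PySem.Int.floordiv x s = 1 ∨ PySem.Int.floordiv x s = 3) ∧ y < s then "crystal"
  else if m ≤ 1 then "empty"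
  else if y ≥ 2 * s then check (m - 1) (PySem.Int.mod x s) (PySem.Int.mod y (2 * s))
  else check (m - 1) (PySem.Int.mod x s) (PySem.Int.mod y s)
termination_by m.toNat
decreasing_by all_goals omega

-- ===== PORT B =====
-- B's while-loop; the fuel m.toNat only bounds the iteration count: the loop divides s = 5^(m-1)
-- by 5 each pass and stops at s = 1, so for m ≥ 1 (Pre_check) the fuel is never exhausted.
def checkAltGo : Nat → Int → Int → Int → String
  | 0, _, _, _ => "empty"
  | n + 1, s, x, y =>
    if PySem.Int.floordiv x s = 2 then
      if y < 2 * s then "crystal"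
      else if s = 1 then "empty"
      else checkAltGo n (PySem.Int.floordiv s 5) (PySem.Int.mod x s) (PySem.Int.mod y (2 * s))
    else if PySem.Int.floordiv x s = 1 ∨ x = 3 * s then
      if y ≥ 2 * s then "empty"
      else if y < s then "crystal"
      else if s = 1 then "empty"
      else checkAltGo n (PySem.Int.floordiv s 5) (PySem.Int.mod x s) (PySem.Int.mod y s)
    else "empty"

def check_alt (m : Int) (x : Int) (y : Int) : String :=
  checkAltGo m.toNat (5 ^ (m - 1).toNat) x y

-- ===== PRECONDITION & SPEC =====
-- Pre_check excludes m ≤ 0: there Python evaluates 5**(m-1) as a float (A's guards run in float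
-- arithmetic, and for very negative m A raises ZeroDivisionError), so the comparisons are not
-- the integer-exact semantics these Int ports implement.
def Pre_check (m : Int) (x : Int) (y : Int) : Prop := 1 ≤ m
instance (m : Int) (x : Int) (y : Int) : Decidable (Pre_check m x y) := by unfold Pre_check; infer_instance
def pvWitness_check : Int × Int × Int := (3, 30, 7)

def Spec_check (m : Int) (x : Int) (y : Int) (out : String) : Prop := out = check_alt m x y
instance (m : Int) (x : Int) (y : Int) (out : String) : Decidable (Spec_check m x y out) := by unfold Spec_check; infer_instance

-- ===== CLAIM (what is proved, stated in full; the proofs are below) =====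
def Claim_equal_check : Prop := ∀ (m : Int) (x : Int) (y : Int), Dom_check m x y → Pre_check m x y → Spec_check m x y (check m x y)

-- ===== LEMMAS AND PROOFS =====

-- One level of A's guard cascade (including its 'm == 1' base test) equals one pass of B's loop
-- body, for abstract continuations RA (A's recursive call) and RB (B's next iteration) that agree
-- whenever the loop really continues (s ≠ 1).
theorem level_eq (s x y : Int) (hs : 0 < s) (base : Prop) [Decidable base] (hbase : base ↔ s = 1)
    (RA RB : Int → String) (hrec : s ≠ 1 → ∀ y', RA y' = RB y') :
    (if x < s ∨ x > 3 * s then "empty"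
     else if PySem.Int.floordiv x s = 2 ∧ y < 2 * s then "crystal"
     else if PySem.Int.floordiv x s ≠ 2 ∧ y ≥ 2 * s then "empty"
     else if (PySem.Int.floordiv x s = 1 ∨ PySem.Int.floordiv x s = 3) ∧ y < s then "crystal"
     else if base then "empty"
     else if y ≥ 2 * s then RA (PySem.Int.mod y (2 * s))
     else RA (PySem.Int.mod y s))
    =
    (if PySem.Int.floordiv x s = 2 then
       if y < 2 * s then "crystal"
       else if s = 1 then "empty"
       else RB (PySem.Int.mod y (2 * s))
     else if PySem.Int.floordiv x s = 1 ∨ x = 3 * s then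
       if y ≥ 2 * s then "empty"
       else if y < s then "crystal"
       else if s = 1 then "empty"
       else RB (PySem.Int.mod y s)
     else "empty") := by
  have h1 : PySem.Int.floordiv x s = 1 ↔ 1 * s ≤ x ∧ x < (1 + 1) * s := PySem.Int.floordiv_eq_iff_of_pos hs
  have h2 : PySem.Int.floordiv x s = 2 ↔ 2 * s ≤ x ∧ x < (2 + 1) * s := PySem.Int.floordiv_eq_iff_of_pos hs
  have h3 : PySem.Int.floordiv x s = 3 ↔ 3 * s ≤ x ∧ x < (3 + 1) * s := PySem.Int.floordiv_eq_iff_of_pos hs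
  split_ifs with g1 g2 g3 g4 g5 g6 g7 g8 g9 g10 g11 g12 g13 g14 g15 g16 g17 g18 <;>
    first
      | rfl
      | (exact hrec (by assumption) _)
      | (exact absurd rfl (by simp only [h1, h2, h3, hbase] at *; omega))
      | (simp only [h1, h2, h3, hbase, not_and, not_or, not_lt, not_le, ne_eq] at *; omega)

theorem pow5_pos (k : Nat) : (0:Int) < 5 ^ k := by positivity

theorem pow5_div5 (k : Nat) : PySem.Int.floordiv ((5:Int) ^ (k + 1)) 5 = 5 ^ k := by
  have h : (0:Int) < 5 := by norm_num
  rw [PySem.Int.floordiv_eq_iff_of_pos h]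
  have : (5:Int) ^ (k + 1) = 5 ^ k * 5 := pow_succ 5 k
  constructor <;> nlinarith [pow5_pos k]

theorem pow5_eq_one_iff (k : Nat) : (5:Int) ^ k = 1 ↔ k = 0 := by
  constructor
  · intro h
    by_contra hk
    have h1 : 1 ≤ k := Nat.one_le_iff_ne_zero.mpr hk
    have : (5:Int) ^ 1 ≤ 5 ^ k := pow_le_pow_right₀ (by norm_num) h1
    simp [h] at this
  · rintro rfl; rfl

theorem main_eq : ∀ (k : Nat) (x y : Int),
    check ((k : Int) + 1) x y = checkAltGo (k + 1) (5 ^ k) x y := by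
  intro k
  induction k with
  | zero =>
    intro x y
    rw [check]
    simp only [checkAltGo]
    have ht : (((0:Nat):Int) + 1 - 1).toNat = 0 := by omega
    rw [ht]
    exact level_eq (5 ^ 0) x y (pow5_pos 0) (((0:Nat):Int) + 1 ≤ 1)
      (by rw [pow5_eq_one_iff]; omega)
      (fun y' => check (((0:Nat):Int) + 1 - 1) (PySem.Int.mod x (5 ^ 0)) y')
      (fun y' => checkAltGo 0 (PySem.Int.floordiv (5 ^ 0) 5) (PySem.Int.mod x (5 ^ 0)) y')
      (fun hne => absurd rfl hne)
  | succ k ih =>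
    intro x y
    rw [check]
    conv_rhs => rw [checkAltGo]
    have ht : (((k+1:Nat):Int) + 1 - 1).toNat = k + 1 := by omega
    rw [ht]
    have harg : ((k+1:Nat):Int) + 1 - 1 = ((k:Nat):Int) + 1 := by push_cast; ring
    refine level_eq (5 ^ (k+1)) x y (pow5_pos (k+1)) (((k+1:Nat):Int) + 1 ≤ 1)
      (by rw [pow5_eq_one_iff]; omega)
      _ _ (fun _ y' => ?_)
    rw [harg, pow5_div5, ih]

-- ===== VERDICT (by name: the statement is the Claim_ definition above) =====
theorem check_spec : Claim_equal_check := by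
  intro m x y _ hpre
  unfold Spec_check check_alt
  have hk : ((m - 1).toNat : Int) + 1 = m := by unfold Pre_check at hpre; omega
  have hn : m.toNat = (m - 1).toNat + 1 := by unfold Pre_check at hpre; omega
  calc check m x y = check (((m - 1).toNat : Int) + 1) x y := by rw [hk]
    _ = checkAltGo ((m - 1).toNat + 1) (5 ^ (m - 1).toNat) x y := main_eq _ x y
    _ = checkAltGo m.toNat (5 ^ (m - 1).toNat) x y := by rw [hn]
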